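-- pv_equiv track=rewrite | github.com/bibikusu/lightweight-2ai-orchestrator | orchestration/run_session.py | normalize_failure_type_by_priority
-- ===== SOURCE A (Python) =====
-- from typing import Any, Dict, List, Optional, Tuple, Union
--
-- FAILURE_TYPE_PRIORITY_ORDER: List[str] = [
--     "patch_apply_failure",
--     "generated_artifact_invalid",
--     "build_error",
--     "import_error",
--     "type_mismatch",
--     "test_failure",
--     "scope_violation",
--     "breaking_change",
--     "spec_missing",
-- ]
--
-- def normalize_failure_type_by_priority(candidates: list) -> str:
--     """複数の failure_type 候補から、FAILURE_TYPE_PRIORITY_ORDER に基づき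
--     最も優先度の高い1つを返す。候補が空なら 'spec_missing' を返す。"""
--     if not candidates:
--         return "spec_missing"
--     best: Optional[str] = None
--     best_idx = len(FAILURE_TYPE_PRIORITY_ORDER)
--     for ft in candidates:
--         ft_str = str(ft)
--         try:
--             idx = FAILURE_TYPE_PRIORITY_ORDER.index(ft_str)
--         except ValueError:
--             idx = len(FAILURE_TYPE_PRIORITY_ORDER)
--         if idx < best_idx:
--             best_idx = idx
--             best = ft_str
--     return best if best is not None else "spec_missing"
-- ===== SOURCE B (Python) =====
-- from typing import Any, Dict, List, Optional, Tuple, Union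
--
-- FAILURE_TYPE_PRIORITY_ORDER: List[str] = [
--     "patch_apply_failure",
--     "generated_artifact_invalid",
--     "build_error",
--     "import_error",
--     "type_mismatch",
--     "test_failure",
--     "scope_violation",
--     "breaking_change",
--     "spec_missing",
-- ]
--
-- def normalize_failure_type_by_priority(candidates: list) -> str:
--     """Walk the priority table in order and return the first entry present
--     among the (stringified) candidates; fall through to 'spec_missing'."""
--     cand = {str(ft) for ft in candidates}
--     for ft in FAILURE_TYPE_PRIORITY_ORDER:
--         if ft in cand:
--             return ft
--     return "spec_missing"
-- ===== Notes on version B (the rewrite author's own statement) =====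
-- stated objective: faster
-- what changed: B builds a set of the candidates once and scans the fixed 9-entry priority table in order, returning the first entry present, instead of A's loop over the candidates with a list.index scan and a best-index accumulator per candidate.
import Mathlib
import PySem

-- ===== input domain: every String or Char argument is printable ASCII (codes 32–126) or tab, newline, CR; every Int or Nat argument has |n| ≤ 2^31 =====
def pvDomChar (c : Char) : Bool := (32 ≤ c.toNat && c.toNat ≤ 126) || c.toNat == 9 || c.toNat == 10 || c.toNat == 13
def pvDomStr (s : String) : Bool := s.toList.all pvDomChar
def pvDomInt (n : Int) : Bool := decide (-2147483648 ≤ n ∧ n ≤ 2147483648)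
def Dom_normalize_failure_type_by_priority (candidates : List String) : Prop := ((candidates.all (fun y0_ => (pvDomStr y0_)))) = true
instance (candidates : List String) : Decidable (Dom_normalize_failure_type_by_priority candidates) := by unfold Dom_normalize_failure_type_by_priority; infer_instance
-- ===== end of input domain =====

-- B replaces A's per-candidate list.index scan with one pass over the fixed priority
-- table that returns the first entry present among the candidates (idiomatic).

-- module constant shared by both implementations
def FAILURE_TYPE_PRIORITY_ORDER : List String :=
  [ "patch_apply_failure"
  , "generated_artifact_invalid"
  , "build_error"
  , "import_error"
  , "type_mismatch"
  , "test_failure"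
  , "scope_violation"
  , "breaking_change"
  , "spec_missing" ]

-- ===== PORT A =====
-- A's loop body: idx = ORDER.index(ft) (ValueError → len), keep (best, best_idx) if idx < best_idx
def pvLoopA (st : Option String × Nat) (ft : String) : Option String × Nat :=
  let idx := (PySem.List.index? FAILURE_TYPE_PRIORITY_ORDER ft).getD FAILURE_TYPE_PRIORITY_ORDER.length
  if idx < st.2 then (some ft, idx) else st

def normalize_failure_type_by_priority (candidates : List String) : String :=
  if candidates = [] then "spec_missing"
  else
    let st := candidates.foldl pvLoopA (none, FAILURE_TYPE_PRIORITY_ORDER.length)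
    match st.1 with
    | some b => b
    | none => "spec_missing"

-- ===== PORT B =====
def normalize_failure_type_by_priority_alt (candidates : List String) : String :=
  let cand : PySem.Set String := PySem.Set.ofList candidates
  match FAILURE_TYPE_PRIORITY_ORDER.find? (fun ft => PySem.Set.contains cand ft) with
  | some ft => ft
  | none => "spec_missing"

-- ===== PRECONDITION & SPEC =====
def Spec_normalize_failure_type_by_priority (candidates : List String) (out : String) : Prop := out = normalize_failure_type_by_priority_alt candidates
instance (candidates : List String) (out : String) : Decidable (Spec_normalize_failure_type_by_priority candidates out) := by unfold Spec_normalize_failure_type_by_priority; infer_instance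

-- ===== CLAIM (what is proved, stated in full; the proofs are below) =====
def Claim_equal_normalize_failure_type_by_priority : Prop := ∀ (candidates : List String), Dom_normalize_failure_type_by_priority candidates → Spec_normalize_failure_type_by_priority candidates (normalize_failure_type_by_priority candidates)

-- ===== LEMMAS AND PROOFS =====

-- priority index of a string: ORDER.index(s), or 9 when absent
def pvIdx (s : String) : Nat :=
  (PySem.List.index? FAILURE_TYPE_PRIORITY_ORDER s).getD FAILURE_TYPE_PRIORITY_ORDER.length

lemma pvIdx_spec (s : String) (h : pvIdx s < FAILURE_TYPE_PRIORITY_ORDER.length) :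
    PySem.List.index? FAILURE_TYPE_PRIORITY_ORDER s = some (pvIdx s) := by
  unfold pvIdx at h ⊢
  cases hh : PySem.List.index? FAILURE_TYPE_PRIORITY_ORDER s with
  | none => rw [hh] at h; simp at h
  | some k => simp

-- index of an element of ORDER is at most its position
lemma pvIdx_le_of_getElem (j : Nat) (hj : j < FAILURE_TYPE_PRIORITY_ORDER.length) :
    pvIdx (FAILURE_TYPE_PRIORITY_ORDER[j]) ≤ j := by
  have hmem : FAILURE_TYPE_PRIORITY_ORDER[j] ∈ FAILURE_TYPE_PRIORITY_ORDER :=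
    List.getElem_mem hj
  have hs : (PySem.List.index? FAILURE_TYPE_PRIORITY_ORDER (FAILURE_TYPE_PRIORITY_ORDER[j])).isSome := by
    rw [PySem.List.index?_isSome_iff]; exact hmem
  obtain ⟨k, hk⟩ := Option.isSome_iff_exists.mp hs
  obtain ⟨hkl, hkeq, hmin⟩ := PySem.List.getElem_of_index?_eq_some hk
  have : k ≤ j := by
    by_contra hlt
    exact hmin j (by omega) rfl
  unfold pvIdx; rw [hk]; simpa using this

-- invariant of A's fold: the result is either the initial state, or a candidate with a
-- strictly smaller valid index; and the final index is a lower bound on all candidates' indices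
lemma foldA_spec (l : List String) : ∀ (b : Option String) (bi : Nat),
    bi ≤ FAILURE_TYPE_PRIORITY_ORDER.length →
    (l.foldl pvLoopA (b, bi) = (b, bi) ∨
      ((l.foldl pvLoopA (b, bi)).2 < bi ∧
        ∃ ft ∈ l, (l.foldl pvLoopA (b, bi)).1 = some ft ∧
          PySem.List.index? FAILURE_TYPE_PRIORITY_ORDER ft = some (l.foldl pvLoopA (b, bi)).2)) ∧
    (∀ ft ∈ l, (l.foldl pvLoopA (b, bi)).2 ≤ pvIdx ft) := by
  induction l with
  | nil => intro b bi _; simp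
  | cons x t ih =>
    intro b bi hbi
    simp only [List.foldl_cons]
    have hx : pvLoopA (b, bi) x = if pvIdx x < bi then (some x, pvIdx x) else (b, bi) := rfl
    by_cases hlt : pvIdx x < bi
    · rw [hx, if_pos hlt]
      have hx9 : pvIdx x ≤ FAILURE_TYPE_PRIORITY_ORDER.length := by
        unfold pvIdx
        cases h : PySem.List.index? FAILURE_TYPE_PRIORITY_ORDER x with
        | none => simp
        | some k =>
          obtain ⟨hk, -, -⟩ := PySem.List.getElem_of_index?_eq_some h
          simp; omega
      obtain ⟨hC1, hC2⟩ := ih (some x) (pvIdx x) hx9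
      have hxidx : PySem.List.index? FAILURE_TYPE_PRIORITY_ORDER x = some (pvIdx x) :=
        pvIdx_spec x (by omega)
      constructor
      · rcases hC1 with heq | ⟨hlt2, ft, hft, hsome, hidx⟩
        · right
          rw [heq]
          exact ⟨hlt, x, List.mem_cons_self, rfl, hxidx⟩
        · right
          exact ⟨by omega, ft, List.mem_cons_of_mem _ hft, hsome, hidx⟩
      · intro ft hft
        rcases List.mem_cons.mp hft with rfl | hft'
        · rcases hC1 with heq | ⟨hlt2, -⟩
          · rw [heq]
          · omega
        · exact hC2 ft hft'
    · rw [hx, if_neg hlt]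
      obtain ⟨hC1, hC2⟩ := ih b bi hbi
      refine ⟨?_, ?_⟩
      · rcases hC1 with heq | ⟨h1, ft, hft, hs, hi⟩
        · exact Or.inl heq
        · exact Or.inr ⟨h1, ft, List.mem_cons_of_mem _ hft, hs, hi⟩
      intro ft hft
      rcases List.mem_cons.mp hft with rfl | hft'
      · have hbi_le : bi ≤ pvIdx ft := by omega
        rcases hC1 with heq | ⟨hlt2, -⟩
        · rw [heq]; exact hbi_le
        · omega
      · exact hC2 ft hft'

-- B's predicate is membership in candidates
lemma pred_iff (candidates : List String) (p : String) :
    (PySem.Set.contains (PySem.Set.ofList candidates) p = true) ↔ p ∈ candidates := by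
  rw [PySem.Set.contains_iff]
  exact PySem.Set.mem_ofList candidates p

-- ===== VERDICT (by name: the statement is the Claim_ definition above) =====
theorem normalize_failure_type_by_priority_spec : Claim_equal_normalize_failure_type_by_priority := by
  intro candidates _
  unfold Spec_normalize_failure_type_by_priority
  unfold normalize_failure_type_by_priority normalize_failure_type_by_priority_alt
  obtain ⟨hC1, hC2⟩ := foldA_spec candidates none FAILURE_TYPE_PRIORITY_ORDER.length (le_refl _)
  by_cases hnil : candidates = []
  · subst hnil; decide
  · rw [if_neg hnil]
    simp only
    rcases hC1 with heq | ⟨hlt, ft, hft, hsome, hidx⟩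
    · -- no candidate is in ORDER: B's find? is none
      rw [heq]
      have hnone : FAILURE_TYPE_PRIORITY_ORDER.find?
          (fun p => PySem.Set.contains (PySem.Set.ofList candidates) p) = none := by
        rw [List.find?_eq_none]
        intro p hp hcontains
        have hpmem : p ∈ candidates := (pred_iff candidates p).mp hcontains
        have := hC2 p hpmem
        rw [heq] at this
        have hlt9 : pvIdx p < FAILURE_TYPE_PRIORITY_ORDER.length := by
          unfold pvIdx
          have hs : (PySem.List.index? FAILURE_TYPE_PRIORITY_ORDER p).isSome := by
            rw [PySem.List.index?_isSome_iff]; exact hp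
          obtain ⟨k, hk⟩ := Option.isSome_iff_exists.mp hs
          obtain ⟨hkl, -, -⟩ := PySem.List.getElem_of_index?_eq_some hk
          rw [hk]; exact hkl
        omega
      rw [hnone]
    · -- the winner ft sits at the minimal priority index: B's find? returns it
      rw [hsome]
      obtain ⟨hkl, hkeq, -⟩ := PySem.List.getElem_of_index?_eq_some hidx
      set m := (candidates.foldl pvLoopA (none, FAILURE_TYPE_PRIORITY_ORDER.length)).2 with hm
      have hfind : FAILURE_TYPE_PRIORITY_ORDER.find?
          (fun p => PySem.Set.contains (PySem.Set.ofList candidates) p)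
            = some (FAILURE_TYPE_PRIORITY_ORDER[m]'hkl) := by
        rw [List.find?_eq_some_iff_getElem]
        refine ⟨(pred_iff candidates _).mpr (hkeq ▸ hft), m, hkl, rfl, ?_⟩
        intro j hj
        rw [Bool.not_eq_eq_eq_not, Bool.not_true, Bool.eq_false_iff]
        intro hcontains
        have hjl : j < FAILURE_TYPE_PRIORITY_ORDER.length := by omega
        have hpmem : FAILURE_TYPE_PRIORITY_ORDER[j] ∈ candidates :=
          (pred_iff candidates _).mp hcontains
        have h1 := hC2 _ hpmem
        have h2 := pvIdx_le_of_getElem j hjl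
        omega
      rw [hfind, hkeq]
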